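-- pv_equiv track=rewrite | github.com/youngjun0627/backend.ai-agent | ai/backend/agent/files.py | diff_file_stats
-- ===== SOURCE A (Python) =====
-- def diff_file_stats(fs1, fs2):
--     k2 = set(fs2.keys())
--     k1 = set(fs1.keys())
--     new_files = k2 - k1
--     modified_files = set()
--     for k in (k2 - new_files):
--         if fs1[k] < fs2[k]:
--             modified_files.add(k)
--     return new_files | modified_files
-- ===== SOURCE B (Python) =====
-- def diff_file_stats(fs1, fs2):
--     # Carve the answer out of two working copies of fs2 by walking the old stats:
--     # every file the old stats know is discharged from `new`, every up-to-date
--     # file from `mod`; finally the new files are discharged from `mod` as well.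
--     new = dict(fs2)
--     mod = dict(fs2)
--     for k, v1 in fs1.items():
--         new.pop(k, None)
--         if k in mod and mod[k] <= v1:
--             del mod[k]
--     for k in new:
--         del mod[k]
--     return set(new) | set(mod)
-- ===== Notes on version B (the rewrite author's own statement) =====
-- stated objective: alternative
-- what changed: Instead of A's set algebra over fs2's keys (k2-k1 difference, a loop over the intersection testing fs1[k]<fs2[k], then a union), B carves the answer out of two working dict copies of fs2 by iterating over the OLD stats fs1, deleting known files from `new` and up-to-date files from `mod`, then discharging the new files from `mod`; the surviving keys are the result.
import Mathlib
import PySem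

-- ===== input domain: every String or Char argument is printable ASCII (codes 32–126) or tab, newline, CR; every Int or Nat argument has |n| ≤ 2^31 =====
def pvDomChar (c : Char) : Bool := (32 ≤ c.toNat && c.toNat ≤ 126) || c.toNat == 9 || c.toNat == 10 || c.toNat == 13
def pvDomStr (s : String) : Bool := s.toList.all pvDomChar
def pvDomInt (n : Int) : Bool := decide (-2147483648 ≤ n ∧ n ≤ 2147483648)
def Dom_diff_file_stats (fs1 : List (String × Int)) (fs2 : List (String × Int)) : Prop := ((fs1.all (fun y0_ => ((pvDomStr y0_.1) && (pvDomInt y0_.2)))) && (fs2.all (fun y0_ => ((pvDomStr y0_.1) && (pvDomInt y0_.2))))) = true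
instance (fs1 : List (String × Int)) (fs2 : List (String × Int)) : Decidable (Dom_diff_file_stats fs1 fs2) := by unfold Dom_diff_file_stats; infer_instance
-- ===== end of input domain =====

-- B replaces A's set algebra over fs2's keys by a deletion-driven pass over the OLD stats fs1,
-- carving the answer out of two working dict copies of fs2; objective: alternative.

-- ===== PORT A =====
-- In A's loop, fs1[k]/fs2[k] never raise (k is in both dicts there), so getD with default 0 is exact.
def diff_file_stats (fs1 : List (String × Int)) (fs2 : List (String × Int)) : List String :=
  let d1 : PySem.Dict String Int := PySem.Dict.mk fs1
  let d2 : PySem.Dict String Int := PySem.Dict.mk fs2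
  let k2 : PySem.Set String := PySem.Set.ofList (PySem.Dict.keys d2)
  let k1 : PySem.Set String := PySem.Set.ofList (PySem.Dict.keys d1)
  let new_files := PySem.Set.diff k2 k1
  let modified_files :=
    (PySem.Set.diff k2 new_files).foldl
      (fun acc k =>
        if PySem.Dict.getD d1 k 0 < PySem.Dict.getD d2 k 0 then PySem.Set.add acc k else acc)
      PySem.Set.empty
  PySem.Set.union new_files modified_files

-- ===== PORT B =====
-- new.pop(k, None): drop the entry if present, otherwise leave the dict unchanged
def pvPopDrop (d : PySem.Dict String Int) (k : String) : PySem.Dict String Int :=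
  match PySem.Dict.pop? d k with
  | some (_, d') => d'
  | none => d

def diff_file_stats_alt (fs1 : List (String × Int)) (fs2 : List (String × Int)) : List String :=
  let d1 : PySem.Dict String Int := PySem.Dict.mk fs1
  let start : PySem.Dict String Int := PySem.Dict.mk fs2
  let p :=
    (PySem.Dict.items d1).foldl
      (fun (p : PySem.Dict String Int × PySem.Dict String Int) kv =>
        (pvPopDrop p.1 kv.1,
         if PySem.Dict.contains p.2 kv.1 && decide (PySem.Dict.getD p.2 kv.1 0 ≤ kv.2)
         then PySem.Dict.erase p.2 kv.1 else p.2))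
      (start, start)
  let md :=
    (PySem.Dict.keys p.1).foldl (fun m k => PySem.Dict.erase m k) p.2
  PySem.Set.union (PySem.Set.ofList (PySem.Dict.keys p.1))
                  (PySem.Set.ofList (PySem.Dict.keys md))

-- ===== PRECONDITION & SPEC =====
-- Pre_ excludes association lists with duplicate keys: they do not encode any Python dict
-- (A's and B's inputs are dicts, whose keys are unique), and which duplicate wins is an
-- artefact of the list encoding, not of either program.
def Pre_diff_file_stats (fs1 : List (String × Int)) (fs2 : List (String × Int)) : Prop :=
  (fs1.map Prod.fst).Nodup ∧ (fs2.map Prod.fst).Nodup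
instance (fs1 : List (String × Int)) (fs2 : List (String × Int)) : Decidable (Pre_diff_file_stats fs1 fs2) := by unfold Pre_diff_file_stats; infer_instance

def pvWitness_diff_file_stats : (List (String × Int)) × (List (String × Int)) :=
  ([("a", 1), ("c", 5)], [("a", 2), ("b", 0), ("c", 3)])

def Spec_diff_file_stats (fs1 : List (String × Int)) (fs2 : List (String × Int)) (out : List String) : Prop := out = diff_file_stats_alt fs1 fs2
instance (fs1 : List (String × Int)) (fs2 : List (String × Int)) (out : List String) : Decidable (Spec_diff_file_stats fs1 fs2 out) := by unfold Spec_diff_file_stats; infer_instance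

-- ===== CLAIM (what is proved, stated in full; the proofs are below) =====
def Claim_equal_diff_file_stats : Prop := ∀ (fs1 : List (String × Int)) (fs2 : List (String × Int)), Dom_diff_file_stats fs1 fs2 → Pre_diff_file_stats fs1 fs2 → Spec_diff_file_stats fs1 fs2 (diff_file_stats fs1 fs2)

-- ===== LEMMAS AND PROOFS =====

-- pop(k, None) is erase (erasing an absent key is a no-op)
theorem pvPopDrop_eq_erase (d : PySem.Dict String Int) (k : String) :
    pvPopDrop d k = PySem.Dict.erase d k := by
  unfold pvPopDrop
  rcases h : PySem.Dict.pop? d k with _ | ⟨v, d'⟩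
  · -- key absent: erase is a no-op
    simp only [PySem.Dict.pop?, Option.map_eq_none_iff] at h
    have hk : k ∉ d.keys := (PySem.Dict.get?_eq_none_iff_not_mem_keys d k).mp h
    apply PySem.Dict.ext
    simp only [PySem.Dict.erase]
    rw [List.filter_eq_self.mpr]
    intro p hp
    have hm : p.1 ∈ d.keys := List.mem_map_of_mem hp
    have : p.1 ≠ k := fun hpk => absurd (hpk ▸ hm) hk
    simp [this]
  · simp only [PySem.Dict.pop?, Option.map_eq_some_iff] at h
    obtain ⟨w, -, hw⟩ := h
    rw [← hw]

-- a fold with componentwise-independent updates is a pair of folds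
theorem pvFoldPair {α β γ : Type} (l : List γ) (f : α → γ → α) (g : β → γ → β)
    (a : α) (b : β) :
    l.foldl (fun (p : α × β) x => (f p.1 x, g p.2 x)) (a, b) = (l.foldl f a, l.foldl g b) := by
  induction l generalizing a b with
  | nil => rfl
  | cons x xs ih => simpa using ih (f a x) (g b x)

-- a loop of deletions is one filter of the items
theorem pvFoldErase {β : Type} (l : List β) (key : β → String)
    (d : PySem.Dict String Int) :
    (l.foldl (fun d x => PySem.Dict.erase d (key x)) d).items
      = d.items.filter (fun p => !(l.any (fun x => p.1 == key x))) := by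
  induction l generalizing d with
  | nil => simp
  | cons x xs ih =>
    rw [List.foldl_cons, ih]
    simp only [PySem.Dict.erase, List.filter_filter]
    apply List.filter_congr
    intro p _
    cases h : p.1 == key x <;> simp [h]

-- erasing keeps the keys unique
theorem pvNodupKeysErase (d : PySem.Dict String Int) (k : String) (hd : d.keys.Nodup) :
    (PySem.Dict.erase d k).keys.Nodup := by
  exact List.Nodup.sublist (List.Sublist.map _ List.filter_sublist) hd

-- the conditional-deletion loop over distinct-key items is one filter of the items
theorem pvFoldCondErase (l : List (String × Int)) (d : PySem.Dict String Int)
    (hd : d.keys.Nodup) :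
    (l.foldl
        (fun d kv =>
          if PySem.Dict.contains d kv.1 && decide (PySem.Dict.getD d kv.1 0 ≤ kv.2)
          then PySem.Dict.erase d kv.1 else d)
        d).items
      = d.items.filter (fun p => !(l.any (fun kv => kv.1 == p.1 && decide (p.2 ≤ kv.2)))) := by
  induction l generalizing d with
  | nil => simp
  | cons kv xs ih =>
    rw [List.foldl_cons]
    by_cases hc : (PySem.Dict.contains d kv.1 && decide (PySem.Dict.getD d kv.1 0 ≤ kv.2)) = true
    · rw [if_pos hc, ih _ (pvNodupKeysErase d kv.1 hd)]
      simp only [PySem.Dict.erase, List.filter_filter]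
      apply List.filter_congr
      intro p hp
      by_cases hpk : p.1 = kv.1
      · have hg : PySem.Dict.getD d p.1 0 = p.2 :=
          PySem.Dict.getD_of_mem_items d (by simpa using hp) hd 0
        have hle : p.2 ≤ kv.2 := by
          have := ((Bool.and_eq_true _ _).mp hc).2
          rw [← hpk, hg] at this
          exact of_decide_eq_true this
        simp [hpk, hle]
      · have : (kv.1 == p.1) = false := by simp [Ne.symm hpk]
        simp [this, hpk]
    · rw [if_neg hc, ih _ hd]
      apply List.filter_congr
      intro p hp
      by_cases hpk : p.1 = kv.1
      · have hcon : PySem.Dict.contains d kv.1 = true := by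
          rw [← hpk]
          exact (PySem.Dict.contains_iff_mem_keys d p.1).mpr (List.mem_map_of_mem hp)
        have hg : PySem.Dict.getD d p.1 0 = p.2 :=
          PySem.Dict.getD_of_mem_items d (by simpa using hp) hd 0
        have hnle : ¬ (p.2 ≤ kv.2) := by
          intro hle
          apply hc
          rw [Bool.and_eq_true]
          exact ⟨hcon, by rw [← hpk, hg]; exact decide_eq_true hle⟩
        simp [hpk, hnle]
      · have : (kv.1 == p.1) = false := by simp [Ne.symm hpk]
        simp [this]

-- on a member of l, "occurs in l's not-C part" decides C
theorem pvAnyFilterNot (l : List String) (C : String → Bool) (k : String) (hk : k ∈ l) :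
    ((l.filter (fun x => !(C x))).any (fun x => k == x)) = !(C k) := by
  rcases hC : C k with _ | _
  · have : (l.filter (fun x => !(C x))).any (fun x => k == x) = true :=
      List.any_eq_true.mpr ⟨k, List.mem_filter.mpr ⟨hk, by simp [hC]⟩, by simp⟩
    simp [this]
  · have : (l.filter (fun x => !(C x))).any (fun x => k == x) = false := by
      rw [List.any_eq_false]
      intro x hx h
      have hxk : x = k := (eq_of_beq h).symm
      have := (List.mem_filter.mp hx).2
      rw [hxk] at this
      simp [hC] at this
    simp [this]

theorem pvContainsFilterNot (l : List String) (C : String → Bool) (k : String) (hk : k ∈ l) :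
    (List.contains (l.filter (fun x => !(C x))) k) = !(C k) := by
  rcases hC : C k with _ | _
  · have hm : k ∈ l.filter (fun x => !(C x)) := List.mem_filter.mpr ⟨hk, by simp [hC]⟩
    simp [hm]
  · have hm : k ∉ l.filter (fun x => !(C x)) := fun hmem => by
      have := (List.mem_filter.mp hmem).2
      simp [hC] at this
    simp only [Bool.not_true]
    rw [Bool.eq_false_iff]
    intro h
    exact hm (List.contains_iff_mem.mp h)

-- a filter of the items, projected to keys, is a filter of the keys
theorem pvKeysFilter (d : PySem.Dict String Int) (hd : d.keys.Nodup) (q : String × Int → Bool) :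
    (d.items.filter q).map Prod.fst = d.keys.filter (fun k => q (k, PySem.Dict.getD d k 0)) := by
  rw [PySem.Dict.items_eq_map_keys d hd 0, List.filter_map, List.map_map]
  simp [Function.comp_def]

-- membership in set(keys(d)) is Dict.contains
theorem pvContainsOfKeys (d : PySem.Dict String Int) (x : String) :
    (PySem.Set.ofList (PySem.Dict.keys d)).contains x = PySem.Dict.contains d x := by
  rcases h : PySem.Dict.contains d x with _ | _
  · simp only [PySem.Set.contains, Bool.eq_false_iff]
    intro hcon
    have hx : x ∈ PySem.Set.ofList (PySem.Dict.keys d) := List.contains_iff_mem.mp hcon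
    have : x ∈ PySem.Dict.keys d := (PySem.Set.mem_ofList _ _).mp hx
    have := (PySem.Dict.contains_iff_mem_keys d x).mpr this
    simp [h] at this
  · have hx : x ∈ PySem.Dict.keys d := (PySem.Dict.contains_iff_mem_keys d x).mp h
    exact List.contains_iff_mem.mpr ((PySem.Set.mem_ofList _ _).mpr hx)

-- ===== VERDICT (by name: the statement is the Claim_ definition above) =====
theorem diff_file_stats_spec : Claim_equal_diff_file_stats := by
  intro fs1 fs2 _ hpre
  obtain ⟨h1, h2⟩ := hpre
  simp only [Spec_diff_file_stats, diff_file_stats, diff_file_stats_alt]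
  set d1 : PySem.Dict String Int := PySem.Dict.mk fs1 with hd1def
  set d2 : PySem.Dict String Int := PySem.Dict.mk fs2 with hd2def
  have hd1 : d1.keys.Nodup := by rw [hd1def]; simpa using h1
  have hd2 : d2.keys.Nodup := by rw [hd2def]; simpa using h2
  have hsplit := pvFoldPair (l := fs1)
      (f := fun (d : PySem.Dict String Int) (kv : String × Int) => pvPopDrop d kv.1)
      (g := fun (d : PySem.Dict String Int) (kv : String × Int) =>
        if PySem.Dict.contains d kv.1 && decide (PySem.Dict.getD d kv.1 0 ≤ kv.2)
        then PySem.Dict.erase d kv.1 else d)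
      (a := d2) (b := d2)
  rw [hsplit]
  simp only [pvPopDrop_eq_erase]
  -- the three deletion loops are filters of the items
  have hnewIt : (fs1.foldl (fun (d : PySem.Dict String Int) (kv : String × Int) => PySem.Dict.erase d kv.1) d2).items
      = d2.items.filter (fun p => !(fs1.any (fun kv => p.1 == kv.1))) := pvFoldErase fs1 Prod.fst d2
  have hmodIt := pvFoldCondErase fs1 d2 hd2
  -- keys of the "new" survivors: the keys of fs2 unknown to fs1
  have hNK : (fs1.foldl (fun (d : PySem.Dict String Int) (kv : String × Int) => PySem.Dict.erase d kv.1) d2).keys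
      = d2.keys.filter (fun k => !(PySem.Dict.contains d1 k)) := by
    show (fs1.foldl (fun (d : PySem.Dict String Int) (kv : String × Int) => PySem.Dict.erase d kv.1) d2).items.map Prod.fst = _
    rw [hnewIt, pvKeysFilter d2 hd2]
    apply List.filter_congr
    intro k _
    show (!(fs1.any (fun kv => k == kv.1))) = !(PySem.Dict.contains d1 k)
    show _ = !(d1.items.any (fun p => p.1 == k))
    rw [hd1def]
    simp [Bool.beq_comm]
  -- keys of the "mod" survivors after phase one
  have hMK : (fs1.foldl (fun (d : PySem.Dict String Int) (kv : String × Int) =>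
        if PySem.Dict.contains d kv.1 && decide (PySem.Dict.getD d kv.1 0 ≤ kv.2)
        then PySem.Dict.erase d kv.1 else d) d2).items.map Prod.fst
      = d2.keys.filter (fun k =>
          !(fs1.any (fun kv => kv.1 == k && decide (PySem.Dict.getD d2 k 0 ≤ kv.2)))) := by
    rw [hmodIt, pvKeysFilter d2 hd2]
  rw [PySem.Set.ofList_eq_self_of_nodup d2.keys hd2, hNK]
  -- A's new_files is the "unknown to fs1" filter of fs2's keys
  have hnewA : PySem.Set.diff d2.keys (PySem.Set.ofList d1.keys)
      = d2.keys.filter (fun k => !(PySem.Dict.contains d1 k)) := by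
    unfold PySem.Set.diff
    apply List.filter_congr
    intro x _
    rw [pvContainsOfKeys d1 x]
  rw [hnewA]
  -- A's loop runs over the keys of fs2 known to fs1
  have hdiff2 : PySem.Set.diff d2.keys
        (d2.keys.filter (fun k => !(PySem.Dict.contains d1 k)))
      = d2.keys.filter (fun k => PySem.Dict.contains d1 k) := by
    unfold PySem.Set.diff
    apply List.filter_congr
    intro x hx
    show (!(List.contains _ x)) = _
    rw [pvContainsFilterNot d2.keys (fun k => PySem.Dict.contains d1 k) x hx]
    simp
  rw [hdiff2]
  rw [PySem.List.foldl_ite_eq_foldl_filter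
      (p := fun k => PySem.Dict.getD d1 k 0 < PySem.Dict.getD d2 k 0) (f := PySem.Set.add)]
  rw [show PySem.Set.empty = ([] : List String) from rfl, ← PySem.Set.ofList_eq_foldl]
  rw [PySem.Set.ofList_eq_self_of_nodup _ ((hd2.filter _).filter _), List.filter_filter]
  -- B's second deletion loop: discharge the new files from the modified candidates
  have hmdK : ((d2.keys.filter (fun k => !(PySem.Dict.contains d1 k))).foldl
        (fun m k => PySem.Dict.erase m k)
        (fs1.foldl (fun (d : PySem.Dict String Int) (kv : String × Int) =>
          if PySem.Dict.contains d kv.1 && decide (PySem.Dict.getD d kv.1 0 ≤ kv.2)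
          then PySem.Dict.erase d kv.1 else d) d2)).keys
      = d2.keys.filter (fun k =>
          (!((d2.keys.filter (fun k => !(PySem.Dict.contains d1 k))).any (fun x => k == x)))
          && !(fs1.any (fun kv => kv.1 == k && decide (PySem.Dict.getD d2 k 0 ≤ kv.2)))) := by
    show (_ : PySem.Dict String Int).items.map Prod.fst = _
    have htmp := pvFoldErase (d2.keys.filter (fun k => !(PySem.Dict.contains d1 k))) id
      (fs1.foldl (fun (d : PySem.Dict String Int) (kv : String × Int) =>
        if PySem.Dict.contains d kv.1 && decide (PySem.Dict.getD d kv.1 0 ≤ kv.2)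
        then PySem.Dict.erase d kv.1 else d) d2)
    simp only [id_eq] at htmp
    rw [htmp, hmodIt, List.filter_filter, pvKeysFilter d2 hd2]
  rw [hmdK]
  rw [PySem.Set.ofList_eq_self_of_nodup _ (hd2.filter _),
      PySem.Set.ofList_eq_self_of_nodup _ (hd2.filter _)]
  unfold PySem.Set.union
  rw [PySem.Set.update_eq_append_of_disjoint _ _ (hd2.filter _) (by
        intro x hx hxn
        have ha := (List.mem_filter.mp hx).2
        have hb := (List.mem_filter.mp hxn).2
        rw [Bool.and_eq_true] at ha
        simp [ha.2] at hb),
      PySem.Set.update_eq_append_of_disjoint _ _ (hd2.filter _) (by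
        intro x hx hxn
        have ha := (List.mem_filter.mp hx).2
        rw [Bool.and_eq_true] at ha
        have : ((d2.keys.filter (fun k => !(PySem.Dict.contains d1 k))).any (fun y => x == y)) = true :=
          List.any_eq_true.mpr ⟨x, hxn, by simp⟩
        simp [this] at ha)]
  · -- the two modified-file lists coincide on the keys of fs2
    congr 1
    apply List.filter_congr
    intro k hk
    rw [pvAnyFilterNot d2.keys (fun k => PySem.Dict.contains d1 k) k hk]
    rcases hC : PySem.Dict.contains d1 k with _ | _
    · simp
    · -- k is known to fs1: compare the two value tests
      have hany : (fs1.any (fun kv => kv.1 == k && decide (PySem.Dict.getD d2 k 0 ≤ kv.2)))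
          = decide (PySem.Dict.getD d2 k 0 ≤ PySem.Dict.getD d1 k 0) := by
        rcases hle : decide (PySem.Dict.getD d2 k 0 ≤ PySem.Dict.getD d1 k 0) with _ | _
        · rw [List.any_eq_false]
          intro kv hkv hb
          obtain ⟨hb1, hb2⟩ := Bool.and_eq_true .. |>.mp hb
          have hk1 : kv.1 = k := eq_of_beq hb1
          have hg : PySem.Dict.getD d1 k 0 = kv.2 :=
            PySem.Dict.getD_of_mem_items d1 (by rw [hd1def]; exact hk1 ▸ (by simpa using hkv)) hd1 0
          exact of_decide_eq_false hle (hg ▸ of_decide_eq_true hb2)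
        · obtain ⟨p, hp, hpk⟩ := List.any_eq_true.mp hC
          have hk1 : p.1 = k := eq_of_beq hpk
          have hg : PySem.Dict.getD d1 k 0 = p.2 :=
            PySem.Dict.getD_of_mem_items d1 (by rw [hd1def]; exact hk1 ▸ (by simpa using hp)) hd1 0
          have hle' : PySem.Dict.getD d2 k 0 ≤ p.2 := hg ▸ of_decide_eq_true hle
          exact List.any_eq_true.mpr ⟨p, hp, by simp [hk1, hle']⟩
      rw [hany]
      rcases lt_or_ge (PySem.Dict.getD d1 k 0) (PySem.Dict.getD d2 k 0) with h | h
      · simp [h, not_le.mpr h]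
      · simp [not_lt.mpr h, h]
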